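-- pv_equiv track=rewrite | github.com/pypeaday/aoc-2020 | src/day6/main.py | format_data_part_1
-- ===== SOURCE A (Python) =====
-- def format_data_part_1(raw_data: list) -> list:
--     """
--     Takes raw data file and formats the data to be list
--     of answers by group
--     :param raw_data: direct output of get_data
--     :return:
--     """
--     _data = ''
--     inputs = []
--     for line in raw_data:
--         if line == '':
--             inputs.append(_data)
--             _data = ''
--             _group_answers = []
--         else:
--             _data += line.replace(' ', '')
--     if _data != '':
--         inputs.append(_data)
--
--     return inputs
-- ===== SOURCE B (Python) =====
-- def format_data_part_1(raw_data: list) -> list: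
--     """Boundary-index re-implementation: find the empty-line indices first,
--     then emit each group as a join over the slice between boundaries."""
--     boundaries = [i for i, line in enumerate(raw_data) if line == '']
--     inputs = []
--     prev = 0
--     for b in boundaries:
--         inputs.append(''.join(l.replace(' ', '') for l in raw_data[prev:b]))
--         prev = b + 1
--     tail = ''.join(l.replace(' ', '') for l in raw_data[prev:])
--     if tail != '':
--         inputs.append(tail)
--     return inputs
-- ===== Notes on version B (the rewrite author's own statement) =====
-- stated objective: alternative
-- what changed: Replaced the single accumulating scan (mutable string buffer flushed on each empty line) by a two-phase decomposition: first collect the indices of empty lines, then build each group by slicing between consecutive boundaries and joining the slice.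
import Mathlib
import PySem

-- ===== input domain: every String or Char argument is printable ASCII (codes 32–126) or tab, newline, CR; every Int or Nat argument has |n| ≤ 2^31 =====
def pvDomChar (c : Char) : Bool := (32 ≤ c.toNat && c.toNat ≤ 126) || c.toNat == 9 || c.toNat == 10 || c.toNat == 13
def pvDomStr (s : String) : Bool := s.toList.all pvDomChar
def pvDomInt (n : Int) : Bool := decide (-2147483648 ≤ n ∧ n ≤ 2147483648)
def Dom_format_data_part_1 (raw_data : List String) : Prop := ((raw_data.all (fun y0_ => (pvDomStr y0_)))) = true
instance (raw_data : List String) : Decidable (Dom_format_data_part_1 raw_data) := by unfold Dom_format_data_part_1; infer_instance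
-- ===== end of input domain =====

-- B replaces A's single accumulating scan by a boundary-index pass followed by slice-and-join; alternative decomposition, same cost.

-- ===== PORT A =====
-- _data, inputs threaded through the for loop as a foldl state
def pvStepA (st : String × List String) (line : String) : String × List String :=
  if line == "" then ("", st.2 ++ [st.1])
  else (st.1 ++ PySem.Str.replace line " " "", st.2)

def format_data_part_1 (raw_data : List String) : List String :=
  let st := raw_data.foldl pvStepA ("", [])
  if st.1 ≠ "" then st.2 ++ [st.1] else st.2

-- ===== PORT B =====
def pvJoinGroup (xs : List String) : String :=
  PySem.Str.join "" (xs.map (fun l => PySem.Str.replace l " " ""))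

def pvGo (raw : List String) (bs : List Int) (prev : Int) (acc : List String) : List String :=
  match bs with
  | [] =>
      let tail := pvJoinGroup (PySem.List.slice raw (some prev) none)
      if tail ≠ "" then acc ++ [tail] else acc
  | b :: rest =>
      pvGo raw rest (b + 1) (acc ++ [pvJoinGroup (PySem.List.slice raw (some prev) (some b))])

def format_data_part_1_alt (raw_data : List String) : List String :=
  let boundaries := ((PySem.List.enumerate raw_data 0).filter (fun p => p.2 == "")).map (·.1)
  pvGo raw_data boundaries 0 []

-- ===== PRECONDITION & SPEC =====
def Spec_format_data_part_1 (raw_data : List String) (out : List String) : Prop := out = format_data_part_1_alt raw_data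
instance (raw_data : List String) (out : List String) : Decidable (Spec_format_data_part_1 raw_data out) := by unfold Spec_format_data_part_1; infer_instance

-- ===== CLAIM (what is proved, stated in full; the proofs are below) =====
def Claim_equal_format_data_part_1 : Prop := ∀ (raw_data : List String), Dom_format_data_part_1 raw_data → Spec_format_data_part_1 raw_data (format_data_part_1 raw_data)

-- ===== LEMMAS AND PROOFS =====

def pvRep (l : String) : String := PySem.Str.replace l " " ""

-- the groups of raw_data, separated by "" lines (terminator semantics handled by the renderer)
def pvSegs : List String → List (List String)
  | [] => [[]]
  | l :: ls =>
    if l = "" then [] :: pvSegs ls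
    else match pvSegs ls with
      | g :: gs => (l :: g) :: gs
      | [] => [[l]]

-- render the groups, with d the pending accumulated text for the first group
def pvRender (d : String) : List (List String) → List String
  | [] => []
  | [g] => if d ++ pvJoinGroup g ≠ "" then [d ++ pvJoinGroup g] else []
  | g :: gs => (d ++ pvJoinGroup g) :: pvRender "" gs

def pvIdxs : Int → List String → List Int
  | _, [] => []
  | i, l :: ls => if l = "" then i :: pvIdxs (i+1) ls else pvIdxs (i+1) ls

theorem pvSegs_ne_nil (ls : List String) : pvSegs ls ≠ [] := by
  cases ls with
  | nil => simp [pvSegs]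
  | cons l ls =>
    simp only [pvSegs]
    split
    · simp
    · split <;> simp

theorem pvJoinGroup_nil : pvJoinGroup [] = "" := by decide

theorem pvJoinGroup_cons (l : String) (ls : List String) :
    pvJoinGroup (l :: ls) = pvRep l ++ pvJoinGroup ls := by
  apply String.toList_inj.mp
  simp only [pvJoinGroup, pvRep, List.map_cons, PySem.Str.toList_join, String.toList_append]
  cases ls with
  | nil => simp
  | cons y ys => simp [PySem.Chars.join_cons_cons]

theorem pvJoinGroup_append (a b : List String) :
    pvJoinGroup (a ++ b) = pvJoinGroup a ++ pvJoinGroup b := by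
  induction a with
  | nil => simp [pvJoinGroup_nil]
  | cons x xs ih => simp [pvJoinGroup_cons, ih, String.append_assoc]

theorem pvRender_consHead (d l : String) (g : List String) (gs : List (List String)) :
    pvRender d ((l :: g) :: gs) = pvRender (d ++ pvRep l) (g :: gs) := by
  cases gs with
  | nil => simp [pvRender, pvJoinGroup_cons, String.append_assoc]
  | cons g' gs' => simp [pvRender, pvJoinGroup_cons, String.append_assoc]

-- A's loop computes the rendered groups
theorem pvA_loop (raw : List String) (d : String) (acc : List String) :
    (let st := raw.foldl pvStepA (d, acc)
     if st.1 ≠ "" then st.2 ++ [st.1] else st.2) = acc ++ pvRender d (pvSegs raw) := by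
  induction raw generalizing d acc with
  | nil =>
    simp only [List.foldl_nil, pvSegs, pvRender, pvJoinGroup_nil, String.append_empty]
    split <;> simp
  | cons l ls ih =>
    by_cases hl : l = ""
    · subst hl
      rw [show ∀ t, List.foldl pvStepA (d,acc) (""::t) = List.foldl pvStepA ("", acc ++ [d]) t from fun t => by simp [pvStepA]]
      rw [ih]
      obtain ⟨g, gs, hg⟩ := List.exists_cons_of_ne_nil (pvSegs_ne_nil ls)
      simp [pvSegs, hg, pvRender, pvJoinGroup_nil, String.append_empty]
    · rw [show ∀ t, List.foldl pvStepA (d,acc) (l::t) = List.foldl pvStepA (d ++ PySem.Str.replace l " " "", acc) t from fun t => by simp [pvStepA, hl]]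
      rw [ih]
      obtain ⟨g, gs, hg⟩ := List.exists_cons_of_ne_nil (pvSegs_ne_nil ls)
      simp only [pvSegs, if_neg hl, hg, pvRender_consHead]
      rfl

-- the boundary list B computes is pvIdxs
theorem pvEnum_filter (raw : List String) (s : Int) :
    ((PySem.List.enumerate raw s).filter (fun p => p.2 == "")).map (·.1) = pvIdxs s raw := by
  induction raw generalizing s with
  | nil => simp [PySem.List.enumerate_nil, pvIdxs]
  | cons l ls ih =>
    simp only [PySem.List.enumerate_cons, List.filter_cons, pvIdxs]
    by_cases hl : l = ""
    · simp [hl, ih]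
    · simp [hl, ih]

-- B's cursor loop renders the remaining groups; pend is the already-read prefix of the current group
theorem pvB_loop (xs pend raw : List String) (prev : Nat) (acc : List String)
    (hdrop : raw.drop prev = pend ++ xs) :
    pvGo raw (pvIdxs ((prev : Int) + pend.length) xs) prev acc
      = acc ++ pvRender (pvJoinGroup pend) (pvSegs xs) := by
  induction xs generalizing pend prev acc with
  | nil =>
    simp only [pvIdxs, pvGo, PySem.List.slice_from_natCast, hdrop, List.append_nil,
      pvSegs, pvRender, pvJoinGroup_nil, String.append_empty]
    split <;> simp
  | cons l ls ih =>
    by_cases hl : l = ""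
    · subst hl
      have hidx : pvIdxs ((prev : Int) + pend.length) ("" :: ls)
          = ((prev + pend.length : Nat) : Int) :: pvIdxs (((prev + pend.length + 1 : Nat) : Int)) ls := by
        have hc1 : ((prev : Int) + pend.length) = ((prev + pend.length : Nat) : Int) := by
          push_cast; ring
        have hc2 : ((prev + pend.length : Nat) : Int) + 1 = ((prev + pend.length + 1 : Nat) : Int) := by
          push_cast; ring
        simp only [pvIdxs, hc1, hc2, if_true, eq_self_iff_true]
      rw [hidx]
      simp only [pvGo]
      have hslice : PySem.List.slice raw (some (prev : Int)) (some ((prev + pend.length : Nat) : Int))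
          = pend := by
        rw [PySem.List.slice_natCast, hdrop, Nat.add_sub_cancel_left,
          List.take_append_of_le_length (le_refl _), List.take_length]
      rw [hslice]
      have hdrop' : raw.drop (prev + pend.length + 1) = ([] : List String) ++ ls := by
        have h3 : raw.drop (prev + pend.length + 1) = (raw.drop prev).drop (pend.length + 1) := by
          rw [List.drop_drop]; ring_nf
        rw [h3, hdrop]
        simp [List.drop_append_of_le_length]
      have hrec := ih [] (prev + pend.length + 1) (acc ++ [pvJoinGroup pend]) hdrop'
      simp only [List.length_nil, Nat.cast_zero, add_zero] at hrec
      have h2 : ((prev + pend.length : Nat) : Int) + 1 = ((prev + pend.length + 1 : Nat) : Int) := by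
        push_cast; ring
      rw [h2, hrec]
      obtain ⟨g, gs, hg⟩ := List.exists_cons_of_ne_nil (pvSegs_ne_nil ls)
      simp [pvSegs, hg, pvRender, pvJoinGroup_nil, String.append_empty]
    · have h1 : ((prev : Int) + pend.length) + 1 = ((prev : Int) + (pend ++ [l]).length) := by
        simp; ring
      have hdrop' : raw.drop prev = (pend ++ [l]) ++ ls := by simp [hdrop]
      have := ih (pend ++ [l]) prev acc hdrop'
      simp only [pvIdxs, if_neg hl, h1]
      rw [this]
      obtain ⟨g, gs, hg⟩ := List.exists_cons_of_ne_nil (pvSegs_ne_nil ls)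
      simp only [pvSegs, if_neg hl, hg, pvRender_consHead, pvJoinGroup_append, pvJoinGroup_cons,
        pvJoinGroup_nil, String.append_empty]

-- ===== VERDICT (by name: the statement is the Claim_ definition above) =====
theorem format_data_part_1_spec : Claim_equal_format_data_part_1 := by
  intro raw _
  unfold Spec_format_data_part_1 format_data_part_1 format_data_part_1_alt
  rw [pvEnum_filter]
  have hB := pvB_loop raw [] raw 0 [] (by simp)
  simp only [List.length_nil, Nat.cast_zero, add_zero, pvJoinGroup_nil, List.nil_append] at hB
  rw [hB]
  have hA := pvA_loop raw "" []
  simpa using hA
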